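-- pv_equiv track=rewrite | github.com/elnatanKleinmen/Biological_Computation | ex2.py | get_all_sub_graphs
-- ===== SOURCE A (Python) =====
-- import copy
--
-- def get_all_vertices_subsets(n):
--     if n == 0:
--         return [[]]
--     prev_all_vertices_subsets = get_all_vertices_subsets(n - 1)
--
--     new_all_vertices_subsets = []
--     for subset in prev_all_vertices_subsets:
--         new_all_vertices_subsets.append(subset)
--
--     for subset in prev_all_vertices_subsets:
--         new_all_vertices_subsets.append(subset+[n])
--
--     return new_all_vertices_subsets
--
-- def get_all_sub_graphs(graph):
--     max_v = max(graph.keys())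
--     all_vertices_subsets = get_all_vertices_subsets(max_v)
--     all_sub_graphs = []
--     for vertices_subset in all_vertices_subsets:
--         sub_graph = {}
--         for v in vertices_subset:
--             sub_graph[v] = []
--         for v in sub_graph:
--             sub_graph[v] = [u for u in graph[v] if u in sub_graph]
--         all_sub_graphs.append(copy.deepcopy(sub_graph))
--     return all_sub_graphs
-- ===== SOURCE B (Python) =====
-- def get_all_sub_graphs(graph):
--     max_v = max(graph.keys())
--     all_sub_graphs = []
--     for mask in range(2 ** max_v):
--         subset = [v for v in range(1, max_v + 1) if (mask >> (v - 1)) & 1]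
--         member = set(subset)
--         all_sub_graphs.append({v: [u for u in graph[v] if u in member] for v in subset})
--     return all_sub_graphs
-- ===== Notes on version B (the rewrite author's own statement) =====
-- stated objective: simpler
-- what changed: Replaced the recursive subset-doubling helper plus separate two-phase dict construction (insert empty lists, then re-walk the dict rewriting values, then deepcopy) with one loop over integer masks 0..2**max_v-1 that decodes each subset from the mask's bits and builds each induced subgraph inline with a single dict comprehension.
import Mathlib
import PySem

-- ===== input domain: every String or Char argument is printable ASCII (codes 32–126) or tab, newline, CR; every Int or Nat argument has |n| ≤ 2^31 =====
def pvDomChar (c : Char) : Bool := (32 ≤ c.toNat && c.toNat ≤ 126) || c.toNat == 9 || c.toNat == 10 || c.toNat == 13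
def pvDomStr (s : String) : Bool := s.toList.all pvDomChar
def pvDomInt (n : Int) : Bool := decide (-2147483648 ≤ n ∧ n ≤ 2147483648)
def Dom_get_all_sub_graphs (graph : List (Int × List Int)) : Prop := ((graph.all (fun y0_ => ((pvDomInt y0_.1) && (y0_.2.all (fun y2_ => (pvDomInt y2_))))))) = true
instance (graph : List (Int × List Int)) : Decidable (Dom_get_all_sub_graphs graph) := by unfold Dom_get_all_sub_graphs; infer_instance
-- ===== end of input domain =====

-- B replaces A's recursive subset-doubling helper by a single loop over integer masks
-- 0..2**max_v-1, building each induced subgraph inline from the mask's bits (objective: simpler).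

-- ===== PORT A =====
-- def get_all_vertices_subsets(n): recursion on n; the Python diverges for n < 0 (excluded by
-- Pre_), so the port recurses on the Nat n and is exact for n ≥ 0.
def getAllVerticesSubsets : Nat → List (List Int)
  | 0 => [[]]
  | n + 1 =>
      let prev := getAllVerticesSubsets n
      let acc := prev.foldl (fun acc subset => acc ++ [subset]) []
      prev.foldl (fun acc subset => acc ++ [subset ++ [((n : Int) + 1)]]) acc

-- max() on an empty dict raises ValueError and graph[v] raises KeyError on a missing vertex
-- v ∈ 1..max_v: both excluded by Pre_ (the none-branch / getD default are never reached there).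
-- copy.deepcopy is the identity on the returned value.
def get_all_sub_graphs (graph : List (Int × List Int)) : List (List (Int × List Int)) :=
  let g := PySem.Dict.ofList graph
  match PySem.List.max? g.keys (fun x => x) with
  | none => []
  | some max_v =>
      (getAllVerticesSubsets max_v.toNat).foldl
        (fun out vs =>
          let d0 := vs.foldl (fun d v => d.insert v ([] : List Int)) PySem.Dict.empty
          let d := d0.keys.foldl
            (fun d v => d.insert v ((g.getD v []).filter (fun u => d.contains u))) d0
          out ++ [d.items]) []

-- ===== PORT B =====
-- 2 ** max_v is ported as (2 : Int) ^ max_v.toNat — exact for max_v ≥ 0 (for max_v < 0 the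
-- Python raises; excluded by Pre_); graph[v] as getD (KeyError excluded by Pre_).
def get_all_sub_graphs_alt (graph : List (Int × List Int)) : List (List (Int × List Int)) :=
  let g := PySem.Dict.ofList graph
  match PySem.List.max? g.keys (fun x => x) with
  | none => []
  | some max_v =>
      (PySem.List.pyRange 0 ((2 : Int) ^ max_v.toNat)).foldl
        (fun out mask =>
          let subset := (PySem.List.pyRange 1 (max_v + 1)).filter
            (fun v => PySem.Int.band (mask >>> (v - 1).toNat) 1 == 1)
          let member := PySem.Set.ofList subset
          out ++ [subset.map (fun v =>
            (v, (g.getD v []).filter (fun u => PySem.Set.contains member u)))]) []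

-- ===== PRECONDITION & SPEC =====
def pvMaxKey (graph : List (Int × List Int)) : Int :=
  (PySem.List.max? (PySem.Dict.ofList graph).keys (fun x => x)).getD 0

-- Pre_ excludes exactly the inputs on which the Python A raises: the empty dict (max() raises
-- ValueError), a negative maximal key (the subset recursion diverges / RecursionError), and a
-- missing vertex in 1..max_v (graph[v] raises KeyError).
def Pre_get_all_sub_graphs (graph : List (Int × List Int)) : Prop :=
  graph ≠ [] ∧ 0 ≤ pvMaxKey graph ∧
  ∀ v ∈ PySem.List.pyRange 1 (pvMaxKey graph + 1), (PySem.Dict.ofList graph).contains v = true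
instance (graph : List (Int × List Int)) : Decidable (Pre_get_all_sub_graphs graph) := by
  unfold Pre_get_all_sub_graphs; infer_instance

def pvWitness_get_all_sub_graphs : (List (Int × List Int)) := [(1, [1, 2]), (2, [1, 3])]

def Spec_get_all_sub_graphs (graph : List (Int × List Int)) (out : List (List (Int × List Int))) : Prop := out = get_all_sub_graphs_alt graph
instance (graph : List (Int × List Int)) (out : List (List (Int × List Int))) : Decidable (Spec_get_all_sub_graphs graph out) := by unfold Spec_get_all_sub_graphs; infer_instance

-- ===== CLAIM (what is proved, stated in full; the proofs are below) =====
def Claim_equal_get_all_sub_graphs : Prop := ∀ (graph : List (Int × List Int)), Dom_get_all_sub_graphs graph → Pre_get_all_sub_graphs graph → Spec_get_all_sub_graphs graph (get_all_sub_graphs graph)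

-- ===== LEMMAS AND PROOFS =====

-- the subset of 1..n selected by the bits of k, in ascending order
def bsub (n k : Nat) : List Int :=
  List.map (fun i : Nat => (i : Int) + 1) (List.filter (fun i => (k >>> i) &&& 1 == 1) (List.range n))

theorem bsub_nodup (n k : Nat) : (bsub n k).Nodup := by
  unfold bsub
  refine List.Nodup.map ?_ (List.Nodup.filter _ List.nodup_range)
  intro a b h
  simp only at h
  omega

theorem bsub_low {n k : Nat} (hk : k < 2 ^ n) : bsub (n + 1) k = bsub n k := by
  unfold bsub
  rw [List.range_succ, List.filter_append]
  have h1 : k >>> n = 0 := by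
    rw [Nat.shiftRight_eq_div_pow]; exact Nat.div_eq_of_lt hk
  simp [h1]

theorem bsub_high {n k : Nat} (hk : k < 2 ^ n) :
    bsub (n + 1) (2 ^ n + k) = bsub n k ++ [(n : Int) + 1] := by
  unfold bsub
  rw [List.range_succ, List.filter_append, List.map_append]
  have h1 : (2 ^ n + k) >>> n = 1 := by
    rw [Nat.shiftRight_eq_div_pow, Nat.add_div_left _ (Nat.two_pow_pos _)]
    rw [Nat.div_eq_of_lt hk]
  have h2 : ∀ i ∈ List.range n, (((2 ^ n + k) >>> i) &&& 1 == 1) = ((k >>> i) &&& 1 == 1) := by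
    intro i hi
    congr 1
    rw [List.mem_range] at hi
    rw [Nat.shiftRight_eq_div_pow, Nat.shiftRight_eq_div_pow]
    have e : 2 ^ n = 2 ^ (n - i - 1) * 2 * 2 ^ i := by
      rw [mul_assoc, ← pow_succ', ← pow_add]
      congr 1
      omega
    rw [e, Nat.add_comm, Nat.add_mul_div_right _ _ (Nat.two_pow_pos i),
      Nat.and_one_is_mod, Nat.and_one_is_mod]
    omega
  rw [List.filter_congr h2]
  simp [h1]

theorem band_one_cast (m : Nat) : (PySem.Int.band (m : Int) 1 == 1) = (m &&& 1 == 1) := by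
  rw [show (1 : Int) = ((1 : Nat) : Int) from rfl, PySem.Int.band_natCast]
  simp
  omega

theorem subsets_eq (n : Nat) :
    getAllVerticesSubsets n = (List.range (2 ^ n)).map (bsub n) := by
  induction n with
  | zero => decide
  | succ n ih =>
      show (getAllVerticesSubsets n).foldl _ ((getAllVerticesSubsets n).foldl _ []) = _
      rw [PySem.List.foldl_append_singleton_eq_self,
        PySem.List.foldl_append_singleton_eq_map, List.nil_append, ih,
        pow_succ, mul_two, List.range_add, List.map_append, List.map_map, List.map_map]
      congr 1
      · exact List.map_congr_left (fun k hk => (bsub_low (List.mem_range.mp hk)).symm)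
      · exact List.map_congr_left (fun k hk => (bsub_high (List.mem_range.mp hk)).symm)

theorem pyRange_one_eq (n : Nat) :
    PySem.List.pyRange 1 ((n : Int) + 1) = List.map (fun i : Nat => (i : Int) + 1) (List.range n) := by
  induction n with
  | zero => decide
  | succ n ih =>
      rw [List.range_succ, List.map_append]
      rw [show ((n + 1 : Nat) : Int) + 1 = ((n : Int) + 1) + 1 by push_cast; ring]
      rw [PySem.List.pyRange_one_succ_right (by omega), ih]
      simp

-- the inner re-insertion loop of A: values get their final filtered lists, keys unchanged
theorem foldl_reinsert_items (F : Int → List Int) (t : List Int)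
    (d : PySem.Dict Int (List Int)) (hnd : t.Nodup) (hk : d.keys.Nodup)
    (hc : ∀ v ∈ t, d.contains v = true) :
    (t.foldl (fun d v => d.insert v ((F v).filter (fun u => d.contains u))) d).items
      = d.items.map (fun p => if p.1 ∈ t then (p.1, (F p.1).filter (fun u => d.contains u)) else p) := by
  induction t generalizing d with
  | nil => simp
  | cons v t ih =>
      have hcv : d.contains v = true := hc v (List.mem_cons_self ..)
      rw [List.foldl_cons]
      have hck : ∀ u, (d.insert v ((F v).filter (fun u => d.contains u))).contains u = d.contains u := by
        intro u
        rw [PySem.Dict.contains_insert]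
        by_cases h : u = v
        · simp [h, hcv]
        · simp [h]
      rw [ih _ (List.Nodup.of_cons hnd)
        (by rw [PySem.Dict.keys_insert_of_contains _ _ hcv]; exact hk)
        (by intro w hw; rw [hck]; exact hc w (List.mem_cons_of_mem _ hw))]
      simp only [hck]
      rw [PySem.Dict.items_insert_of_contains _ _ hcv, List.map_map]
      refine List.map_congr_left (fun p _ => ?_)
      by_cases hpv : p.1 = v
      · simp [hpv, (List.nodup_cons.mp hnd).1]
      · simp [hpv, List.mem_cons]

-- A's per-subset dict construction, as a function of the subset s
theorem buildA_eq (F : Int → List Int) (s : List Int) (hs : s.Nodup) :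
    (((s.foldl (fun d v => d.insert v ([] : List Int)) PySem.Dict.empty).keys).foldl
        (fun d v => d.insert v ((F v).filter (fun u => d.contains u)))
        (s.foldl (fun d v => d.insert v ([] : List Int)) PySem.Dict.empty)).items
      = s.map (fun v => (v, (F v).filter (fun u => decide (u ∈ s)))) := by
  have hkeys : (s.foldl (fun d v => d.insert v ([] : List Int)) PySem.Dict.empty).keys = s := by
    rw [PySem.Dict.keys_foldl_insert (f := fun _ _ => ([] : List Int))]
    rw [PySem.Dict.keys_empty]
    rw [show PySem.Set.update ([] : List Int) s = PySem.Set.ofList s from rfl]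
    exact PySem.Set.ofList_eq_self_of_nodup s hs
  have hitems : (s.foldl (fun d v => d.insert v ([] : List Int)) PySem.Dict.empty).items
      = s.map (fun v => (v, ([] : List Int))) := by
    rw [PySem.Dict.items_foldl_insert_fresh s (fun a => a) (fun _ => ([] : List Int))
      PySem.Dict.empty (fun a _ => PySem.Dict.contains_empty a) (by simpa using hs)]
    simp [show PySem.Dict.empty.items = ([] : List (Int × List Int)) from rfl]
  have hcont : ∀ u, (s.foldl (fun d v => d.insert v ([] : List Int)) PySem.Dict.empty).contains u
      = decide (u ∈ s) := by
    intro u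
    rw [PySem.Dict.contains_eq_decide_mem_keys, hkeys]
  rw [foldl_reinsert_items F
      ((s.foldl (fun d v => d.insert v ([] : List Int)) PySem.Dict.empty).keys)
      (s.foldl (fun d v => d.insert v ([] : List Int)) PySem.Dict.empty)
      (by rw [hkeys]; exact hs) (by rw [hkeys]; exact hs)
      (fun v hv => by rw [hcont]; simpa [hkeys] using hv)]
  rw [hkeys]
  rw [hitems, List.map_map]
  refine List.map_congr_left (fun v hv => ?_)
  simp [hv, hcont]

-- ===== VERDICT (by name: the statement is the Claim_ definition above) =====
theorem get_all_sub_graphs_spec : Claim_equal_get_all_sub_graphs := by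
  intro graph _ hpre
  unfold Spec_get_all_sub_graphs
  obtain ⟨-, hm0, -⟩ := hpre
  unfold pvMaxKey at hm0
  unfold get_all_sub_graphs get_all_sub_graphs_alt
  cases hmax : PySem.List.max? (PySem.Dict.ofList graph).keys (fun x => x) with
  | none => simp only [hmax]
  | some m =>
      rw [hmax] at hm0
      simp only [Option.getD_some] at hm0
      obtain ⟨n, rfl⟩ : ∃ n : Nat, m = (n : Int) := ⟨m.toNat, (Int.toNat_of_nonneg hm0).symm⟩
      simp only [hmax, Int.toNat_natCast]
      rw [PySem.List.foldl_append_singleton_eq_map, List.nil_append]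
      rw [show ((2 : Int) ^ n) = ((2 ^ n : Nat) : Int) by push_cast; ring,
        PySem.List.pyRange_zero_natCast, List.foldl_map,
        PySem.List.foldl_append_singleton_eq_map, List.nil_append]
      rw [subsets_eq, List.map_map]
      refine List.map_congr_left (fun k hk => ?_)
      simp only [Function.comp_apply]
      rw [pyRange_one_eq, List.filter_map]
      have hcond : ∀ i ∈ List.range n,
          (((fun v : Int => PySem.Int.band (((k : Nat) : Int) >>> (v - 1).toNat) 1 == 1)
              ∘ (fun i : Nat => (i : Int) + 1)) i)
            = ((k >>> i) &&& 1 == 1) := by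
        intro i _
        have e1 : ((((i : Nat) : Int) + 1) - 1).toNat = i := by simp
        have e2 : ((k : Nat) : Int) >>> i = (((k >>> i : Nat)) : Int) := by
          simp [Int.shiftRight_eq]
        simp only [Function.comp_apply, e1, e2, band_one_cast]
      rw [List.filter_congr hcond]
      rw [show (List.map (fun i : Nat => (i : Int) + 1)
            (List.filter (fun i => (k >>> i) &&& 1 == 1) (List.range n))) = bsub n k from rfl]
      rw [buildA_eq (fun v => (PySem.Dict.ofList graph).getD v []) (bsub n k) (bsub_nodup n k)]
      refine List.map_congr_left (fun v _ => ?_)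
      simp [PySem.Set.contains, PySem.Set.mem_ofList]
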